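-- pv_equiv track=rewrite | github.com/liyongsea/parallel_corpus_mnbvc | alignment/utils.py | make_color_list
-- ===== SOURCE A (Python) =====
-- def make_color_list(ground_truth, predicted):
--     color_list = []
--     for ref, pred in zip(ground_truth, predicted):
--         if ref:
--             if pred:
--                 color = "green"
--             else:
--                 color = "red"
--         else:
--             if pred:
--                 color = "blue"
--             else:
--                 color = None
--         color_list.append(color)
--     return color_list
-- ===== SOURCE B (Python) =====
-- def make_color_list(ground_truth, predicted):
--     # Overlay painting in three staged passes over a blank canvas:
--     # 1) blank canvas of the common length,
--     # 2) paint "blue" wherever predicted holds,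
--     # 3) where ground truth holds, repaint: "green" if already blue (a hit), else "red" (a miss).
--     colors = [None for _ in zip(ground_truth, predicted)]
--     colors = ["blue" if p else c for c, p in zip(colors, predicted)]
--     colors = [("green" if c == "blue" else "red") if g else c
--               for c, g in zip(colors, ground_truth)]
--     return colors
-- ===== Notes on version B (the rewrite author's own statement) =====
-- stated objective: alternative
-- what changed: Replaces A's single accumulation loop with a nested four-way branch by an overlay-painting scheme in three staged passes: a blank canvas, then paint blue where predicted, then repaint green/red where ground truth holds depending on whether the cell is already blue.
import Mathlib
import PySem

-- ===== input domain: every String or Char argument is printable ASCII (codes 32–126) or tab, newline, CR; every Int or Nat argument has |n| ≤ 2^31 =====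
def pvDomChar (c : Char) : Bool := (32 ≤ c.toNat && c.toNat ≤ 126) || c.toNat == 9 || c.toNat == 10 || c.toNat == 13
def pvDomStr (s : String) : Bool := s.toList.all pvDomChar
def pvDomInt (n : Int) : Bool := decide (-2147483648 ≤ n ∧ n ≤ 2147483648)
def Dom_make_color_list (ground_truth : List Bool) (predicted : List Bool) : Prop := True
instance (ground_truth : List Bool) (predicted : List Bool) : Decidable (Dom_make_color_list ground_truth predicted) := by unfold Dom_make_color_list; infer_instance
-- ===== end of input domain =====

-- B replaces A's single branching accumulation loop by overlay painting in three staged passes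
-- (blank canvas, paint blue where predicted, repaint green/red where ground truth holds); objective: alternative.

-- ===== PORT A =====
-- A: loop over zip, nested if/else choosing the color, append to an accumulator.
def make_color_list (ground_truth : List Bool) (predicted : List Bool) : List (Option String) :=
  (List.zip ground_truth predicted).foldl
    (fun color_list rp =>
      let color : Option String :=
        if rp.1 then
          (if rp.2 then some "green" else some "red")
        else
          (if rp.2 then some "blue" else none)
      color_list ++ [color])
    []

-- ===== PORT B =====
-- B: three staged passes: blank canvas of the common length, paint blue where predicted,
-- then repaint where ground truth holds ("green" if already blue, else "red").
def make_color_list_alt (ground_truth : List Bool) (predicted : List Bool) : List (Option String) :=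
  let colors := (List.zip ground_truth predicted).map (fun _ => (none : Option String))
  let colors := (List.zip colors predicted).map
      (fun cp => if cp.2 then some "blue" else cp.1)
  let colors := (List.zip colors ground_truth).map
      (fun cg => if cg.2 then (if cg.1 == some "blue" then some "green" else some "red") else cg.1)
  colors

-- ===== PRECONDITION & SPEC =====
def Spec_make_color_list (ground_truth : List Bool) (predicted : List Bool) (out : List (Option String)) : Prop := out = make_color_list_alt ground_truth predicted
instance (ground_truth : List Bool) (predicted : List Bool) (out : List (Option String)) : Decidable (Spec_make_color_list ground_truth predicted out) := by unfold Spec_make_color_list; infer_instance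

-- ===== CLAIM =====
def Claim_equal_make_color_list : Prop := ∀ (ground_truth : List Bool) (predicted : List Bool), Dom_make_color_list ground_truth predicted → Spec_make_color_list ground_truth predicted (make_color_list ground_truth predicted)

-- ===== LEMMAS AND PROOFS =====

-- A's foldl with append equals a direct map over the zipped pairs.
theorem make_color_list_foldl_append (l : List (Bool × Bool)) (acc : List (Option String)) :
    l.foldl
      (fun color_list rp =>
        let color : Option String :=
          if rp.1 then
            (if rp.2 then some "green" else some "red")
          else
            (if rp.2 then some "blue" else none)
        color_list ++ [color]) acc
    = acc ++ l.map (fun rp =>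
        if rp.1 then
          (if rp.2 then some "green" else some "red")
        else
          (if rp.2 then some "blue" else none)) := by
  induction l generalizing acc with
  | nil => simp
  | cons hd tl ih => simp [List.foldl, ih]

-- B's staged passes distribute over cons.
theorem make_color_list_alt_cons (r p : Bool) (g q : List Bool) :
    make_color_list_alt (r :: g) (p :: q)
      = (if r then (if p then some "green" else some "red")
         else (if p then some "blue" else none)) :: make_color_list_alt g q := by
  cases r <;> cases p <;> simp [make_color_list_alt]

-- ===== VERDICT =====
theorem make_color_list_spec : Claim_equal_make_color_list := by
  intro g p _
  unfold Spec_make_color_list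
  induction g generalizing p with
  | nil => simp [make_color_list, make_color_list_alt]
  | cons r g ih =>
      cases p with
      | nil => simp [make_color_list, make_color_list_alt]
      | cons b q =>
          rw [make_color_list_alt_cons]
          unfold make_color_list
          rw [List.zip_cons_cons, make_color_list_foldl_append]
          have := ih q
          unfold make_color_list at this
          rw [make_color_list_foldl_append] at this
          simp at this ⊢
          exact this trivial
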